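-- pv_equiv track=rewrite | github.com/nikoladze/aoc2021 | day15/solver.py | fill_full_grid
-- ===== SOURCE A (Python) =====
-- def fill_full_grid(grid):
--     size = len(grid)
--     new_grid = []
--     for y in range(5 * size):
--         new_grid.append([])
--         for x in range(5 * size):
--             if x < size and y < size:
--                 new_grid[-1].append(grid[y][x])
--                 continue
--             if y < size:
--                 ref = new_grid[y][x - size]
--                 new_grid[-1].append(ref + 1 if ref < 9 else 1)
--                 continue
--             ref = new_grid[y - size][x]
--             new_grid[-1].append(ref + 1 if ref < 9 else 1)
--     return new_grid
-- ===== SOURCE B (Python) =====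
-- def fill_full_grid(grid):
--     size = len(grid)
--     n = 5 * size
--     out = []
--     for y in range(n):
--         row = []
--         for x in range(n):
--             v = grid[y % size][x % size]
--             for _ in range(y // size + x // size):
--                 v = v + 1 if v < 9 else 1
--             row.append(v)
--         out.append(row)
--     return out
-- ===== Notes on version B (the rewrite author's own statement) =====
-- stated objective: alternative
-- what changed: Each output cell is computed independently from the base grid by replaying the wrap-increment f(v)=v+1 if v<9 else 1 exactly y//size + x//size times on grid[y%size][x%size], instead of chaining each cell off previously filled cells of new_grid.
import Mathlib
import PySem

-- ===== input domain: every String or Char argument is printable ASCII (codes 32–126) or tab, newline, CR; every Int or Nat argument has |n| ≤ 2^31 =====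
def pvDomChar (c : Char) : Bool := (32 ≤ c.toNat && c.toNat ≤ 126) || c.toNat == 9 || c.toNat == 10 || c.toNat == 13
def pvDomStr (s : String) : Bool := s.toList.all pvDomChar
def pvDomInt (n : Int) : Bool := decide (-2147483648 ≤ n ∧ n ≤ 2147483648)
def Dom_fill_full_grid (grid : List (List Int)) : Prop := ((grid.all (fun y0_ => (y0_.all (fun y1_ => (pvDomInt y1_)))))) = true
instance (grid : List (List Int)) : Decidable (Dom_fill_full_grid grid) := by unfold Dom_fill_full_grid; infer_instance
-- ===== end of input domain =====

-- B computes each output cell independently from the base grid, replaying the wrap-increment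
-- y//size + x//size times, instead of chaining cells off previously filled cells of new_grid;
-- similar cost, different decomposition (objective: alternative).

-- ===== PORT A =====
-- the wrap-increment `ref + 1 if ref < 9 else 1` (shared expression of both Pythons)
def pvWrap (v : Int) : Int := if v < 9 then v + 1 else 1

-- the value appended by A's inner loop body for given new_grid `ng`, current row `cur`, y, x.
-- Indexing uses PySem.List.pyGetD: the `cur`/`ng` accesses are provably in range; the `grid`
-- accesses are in range exactly on Pre_ (outside it Python raises IndexError).
def pvStepA (grid : List (List Int)) (size : Nat) (ng : List (List Int)) (y : Nat)
    (cur : List Int) (x : Nat) : Int :=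
  if x < size ∧ y < size then
    PySem.List.pyGetD (PySem.List.pyGetD grid (y : Int) []) (x : Int) 0
  else if y < size then
    pvWrap (PySem.List.pyGetD cur ((x : Int) - (size : Int)) 0)
  else
    pvWrap (PySem.List.pyGetD (PySem.List.pyGetD ng ((y : Int) - (size : Int)) []) (x : Int) 0)

-- A's inner `for x in range(5*size)` loop building one row by appending
def pvRowA (grid : List (List Int)) (size : Nat) (ng : List (List Int)) (y : Nat) : List Int :=
  (List.range (5 * size)).foldl (fun cur x => cur ++ [pvStepA grid size ng y cur x]) []

def fill_full_grid (grid : List (List Int)) : List (List Int) :=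
  let size := grid.length
  (List.range (5 * size)).foldl (fun ng y => ng ++ [pvRowA grid size ng y]) []

-- ===== PORT B =====
-- B's cell value: replay pvWrap (y/size + x/size) times on grid[y % size][x % size]
-- (the inner `for _ in range(...)` loop of Source B, as Function.iterate)
def pvCell (grid : List (List Int)) (size y x : Nat) : Int :=
  pvWrap^[y / size + x / size]
    (PySem.List.pyGetD (PySem.List.pyGetD grid ((y % size : Nat) : Int) []) ((x % size : Nat) : Int) 0)

def fill_full_grid_alt (grid : List (List Int)) : List (List Int) :=
  let size := grid.length
  (List.range (5 * size)).map (fun y => (List.range (5 * size)).map (fun x => pvCell grid size y x))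

-- ===== PRECONDITION & SPEC =====
-- Pre_ excludes exactly the grids with a row shorter than len(grid): there the Python A
-- (and B alike) raises IndexError on grid[y][x].
def Pre_fill_full_grid (grid : List (List Int)) : Prop :=
  ∀ row ∈ grid, grid.length ≤ row.length
instance (grid : List (List Int)) : Decidable (Pre_fill_full_grid grid) := by
  unfold Pre_fill_full_grid; infer_instance
def pvWitness_fill_full_grid : List (List Int) := [[1, 2], [8, 9]]

def Spec_fill_full_grid (grid : List (List Int)) (out : List (List Int)) : Prop := out = fill_full_grid_alt grid
instance (grid : List (List Int)) (out : List (List Int)) : Decidable (Spec_fill_full_grid grid out) := by unfold Spec_fill_full_grid; infer_instance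

-- ===== CLAIM (what is proved, stated in full; the proofs are below) =====
def Claim_equal_fill_full_grid : Prop := ∀ (grid : List (List Int)), Dom_fill_full_grid grid → Pre_fill_full_grid grid → Spec_fill_full_grid grid (fill_full_grid grid)

-- ===== LEMMAS AND PROOFS =====

-- a fold that appends one element per step builds the map of c, provided each step,
-- fed the prefix already built, produces c x
theorem pv_foldl_build {α : Type} (g : List α → Nat → α) (c : Nat → α) (n : Nat)
    (h : ∀ x, x < n → g ((List.range x).map c) x = c x) :
    (List.range n).foldl (fun cur x => cur ++ [g cur x]) [] = (List.range n).map c := by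
  induction n with
  | zero => simp
  | succ n ih =>
    rw [List.range_succ, List.foldl_append, List.map_append,
        ih (fun x hx => h x (by omega))]
    simp [h n (by omega)]

theorem pv_getD_range_map {α : Type} (c : Nat → α) (d : α) {i n : Nat} (h : i < n) :
    ((List.range n).map c).getD i d = c i := by
  rw [List.getD_eq_getElem?_getD]
  simp [h]

theorem pv_cell_base (grid : List (List Int)) (size y x : Nat) (hy : y < size) (hx : x < size) :
    pvCell grid size y x = PySem.List.pyGetD (PySem.List.pyGetD grid (y : Int) []) (x : Int) 0 := by
  simp [pvCell, Nat.div_eq_of_lt hy, Nat.div_eq_of_lt hx, Nat.mod_eq_of_lt hy, Nat.mod_eq_of_lt hx]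

theorem pv_cell_shift_x (grid : List (List Int)) (size y x : Nat) (hs : 0 < size) (hx : size ≤ x) :
    pvCell grid size y x = pvWrap (pvCell grid size y (x - size)) := by
  have hx' : x = (x - size) + size := by omega
  have hdiv : x / size = (x - size) / size + 1 := by
    conv_lhs => rw [hx']
    exact Nat.add_div_right _ hs
  have hmod : x % size = (x - size) % size := by
    conv_lhs => rw [hx']
    exact Nat.add_mod_right _ _
  unfold pvCell
  rw [hdiv, hmod, show y / size + ((x - size) / size + 1) = (y / size + (x - size) / size) + 1 by omega,
      Function.iterate_succ_apply']

theorem pv_cell_shift_y (grid : List (List Int)) (size y x : Nat) (hs : 0 < size) (hy : size ≤ y) :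
    pvCell grid size y x = pvWrap (pvCell grid size (y - size) x) := by
  have hy' : y = (y - size) + size := by omega
  have hdiv : y / size = (y - size) / size + 1 := by
    conv_lhs => rw [hy']
    exact Nat.add_div_right _ hs
  have hmod : y % size = (y - size) % size := by
    conv_lhs => rw [hy']
    exact Nat.add_mod_right _ _
  unfold pvCell
  rw [hdiv, hmod, show (y - size) / size + 1 + x / size = ((y - size) / size + x / size) + 1 by omega,
      Function.iterate_succ_apply']

-- A's row y, fed the rows 0..y-1 already computed as B computes them, is B's row y
theorem pv_row_eq (grid : List (List Int)) (size y : Nat) (hy : y < 5 * size) :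
    pvRowA grid size ((List.range y).map (fun z => (List.range (5 * size)).map (pvCell grid size z))) y
      = (List.range (5 * size)).map (pvCell grid size y) := by
  have hs : 0 < size := by omega
  unfold pvRowA
  apply pv_foldl_build
  intro x hx
  unfold pvStepA
  by_cases hylt : y < size
  · by_cases hxlt : x < size
    · rw [if_pos ⟨hxlt, hylt⟩, pv_cell_base grid size y x hylt hxlt]
    · have hxs : size ≤ x := by omega
      rw [if_neg (by tauto), if_pos hylt]
      have hcast : (x : Int) - (size : Int) = ((x - size : Nat) : Int) := by omega
      rw [hcast, PySem.List.pyGetD_natCast,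
          pv_getD_range_map _ _ (show x - size < x by omega),
          pv_cell_shift_x grid size y x hs hxs]
  · have hys : size ≤ y := by omega
    rw [if_neg (by tauto), if_neg hylt]
    have hcast : (y : Int) - (size : Int) = ((y - size : Nat) : Int) := by omega
    rw [hcast, PySem.List.pyGetD_natCast, PySem.List.pyGetD_natCast,
        pv_getD_range_map _ _ (show y - size < y by omega),
        pv_getD_range_map _ _ hx,
        pv_cell_shift_y grid size y x hs hys]

-- ===== VERDICT (by name: the statement is the Claim_ definition above) =====
theorem fill_full_grid_spec : Claim_equal_fill_full_grid := by
  intro grid _ _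
  unfold Spec_fill_full_grid fill_full_grid fill_full_grid_alt
  exact pv_foldl_build _ _ _ (fun y hy => pv_row_eq grid grid.length y hy)
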